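-- pv_equiv track=rewrite | github.com/collinsakenga/codewars_solutions | 3 kyu/Battleship field validator.py | general_vertical
-- ===== SOURCE A (Python) =====
-- def general_vertical(length, field):
--     count=0
--     for i in range(len(field)-length+1):
--         for j in range(len(field[i])):
--             flag=True
--             for check in range(i, i+length):
--                 if field[check][j]==0:
--                     flag=False
--                     break
--             if not flag: continue
--             for k in range(i-1, i+length+1):
--                 for l in range(j-1, j+2):
--                     if (k<0 or l<0 or k>=len(field) or l >=len(field[i]) or (l==j and (k>=i and k<=(i+length-1)))):
--                         continue
--                     elif field[k][l]==1:
--                         flag=False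
--             if flag:
--                 count+=1
--     return count
-- ===== SOURCE B (Python) =====
-- # B: per-column prefix-count tables (zeros in the column, ones in the neighbour
-- # columns); each window/side test is a prefix difference instead of A's nested rescans.
--
-- def _pfx(field, j, v):
--     # prefix counts of cells equal to v in column j ([0]*(len(field)+1)-style list;
--     # out-of-bounds columns contribute nothing)
--     p = [0]
--     acc = 0
--     for row in field:
--         if 0 <= j < len(row) and row[j] == v:
--             acc += 1
--         p.append(acc)
--     return p
--
--
-- def general_vertical(length, field):
--     rows = len(field)
--     count = 0
--     cols = len(field[0]) if field else 0
--     for j in range(cols):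
--         zp = _pfx(field, j, 0)      # zeros in column j
--         lp = _pfx(field, j - 1, 1)  # ones in column j-1
--         rp = _pfx(field, j + 1, 1)  # ones in column j+1
--         for i in range(rows - length + 1):
--             lo = max(0, i - 1)
--             hi = min(rows, i + length + 1)
--             if (zp[i + length] - zp[i] == 0
--                     and (i == 0 or field[i - 1][j] != 1)
--                     and (i + length == rows or field[i + length][j] != 1)
--                     and lp[hi] - lp[lo] == 0
--                     and rp[hi] - rp[lo] == 0):
--                 count += 1
--     return count
-- ===== Notes on version B (the rewrite author's own statement) =====
-- stated objective: alternative
-- what changed: Replaces A's per-start window rescan and 3x(length+2) neighbourhood rescan by three per-column prefix-count tables (zeros in the column, ones in each neighbour column), each window/side test becoming a prefix difference; same worst-case order in practice on sparse fields A's early break wins, so no speed is claimed.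
-- outside the precondition, e.g. on general_vertical(1, [[0, 0], []]): A returns 0, B returns 2
import Mathlib
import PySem

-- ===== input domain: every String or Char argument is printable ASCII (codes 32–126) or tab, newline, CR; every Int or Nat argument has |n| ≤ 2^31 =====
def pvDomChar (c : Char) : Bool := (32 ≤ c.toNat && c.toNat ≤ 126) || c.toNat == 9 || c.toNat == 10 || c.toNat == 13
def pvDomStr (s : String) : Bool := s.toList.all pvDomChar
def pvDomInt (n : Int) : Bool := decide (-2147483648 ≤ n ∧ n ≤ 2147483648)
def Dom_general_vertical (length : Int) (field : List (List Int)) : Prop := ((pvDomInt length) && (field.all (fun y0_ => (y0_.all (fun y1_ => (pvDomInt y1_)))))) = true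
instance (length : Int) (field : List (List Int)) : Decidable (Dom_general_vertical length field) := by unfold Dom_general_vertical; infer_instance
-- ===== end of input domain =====

-- B is a different algorithm: three per-column prefix-count tables replace A's nested
-- window/neighbour rescans, each test becoming a prefix difference (equal values on Pre_).

-- ===== PORT A =====
-- field[k][l] in total form (A only reads it at guarded in-range indices under Pre_)
def pyCell (field : List (List Int)) (k l : Int) : Int :=
  PySem.List.pyGetD (PySem.List.pyGetD field k []) l 0

def general_vertical (length : Int) (field : List (List Int)) : Int :=
  (PySem.List.pyRange 0 ((field.length : Int) - length + 1) 1).foldl (fun count i =>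
    let rowLen : Int := ((PySem.List.pyGetD field i []).length : Int)
    (PySem.List.pyRange 0 rowLen 1).foldl (fun count j =>
      let flag := (PySem.List.pyRange i (i + length) 1).foldl
        (fun flag check => if pyCell field check j = 0 then false else flag) true
      if flag = false then count
      else
        let flag := (PySem.List.pyRange (i - 1) (i + length + 1) 1).foldl (fun flag k =>
          (PySem.List.pyRange (j - 1) (j + 2) 1).foldl (fun flag l =>
            if k < 0 ∨ l < 0 ∨ k ≥ (field.length : Int) ∨ l ≥ rowLen
               ∨ (l = j ∧ (k ≥ i ∧ k ≤ i + length - 1)) then flag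
            else if pyCell field k l = 1 then false else flag) flag) flag
        if flag then count + 1 else count) count) 0

-- ===== PORT B =====
-- the per-row test of Source B's _pfx loop: row has a cell equal to v in column j
def pfxCond (j v : Int) (row : List Int) : Bool :=
  decide (0 ≤ j) && decide (j < (row.length : Int)) && decide (PySem.List.pyGetD row j 0 = v)

-- Source B _pfx: running prefix counts starting from [0] — exactly List.scanl
def pfx (field : List (List Int)) (j v : Int) : List Int :=
  List.scanl (fun acc row => acc + (if pfxCond j v row then 1 else 0)) 0 field

def general_vertical_alt (length : Int) (field : List (List Int)) : Int :=
  let rows := field.length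
  let cols := (field.headD []).length
  (PySem.List.pyRange 0 (cols : Int) 1).foldl (fun count j =>
    let zp := pfx field j 0
    let lp := pfx field (j - 1) 1
    let rp := pfx field (j + 1) 1
    (PySem.List.pyRange 0 ((rows : Int) - length + 1) 1).foldl (fun count i =>
      let lo := max 0 (i - 1)
      let hi := min (rows : Int) (i + length + 1)
      if PySem.List.pyGetD zp (i + length) 0 - PySem.List.pyGetD zp i 0 = 0
         ∧ (i = 0 ∨ pyCell field (i - 1) (j : Int) ≠ 1)
         ∧ (i + length = (rows : Int) ∨ pyCell field (i + length) (j : Int) ≠ 1)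
         ∧ PySem.List.pyGetD lp hi 0 - PySem.List.pyGetD lp lo 0 = 0
         ∧ PySem.List.pyGetD rp hi 0 - PySem.List.pyGetD rp lo 0 = 0
      then count + 1 else count) count) 0

-- ===== PRECONDITION & SPEC =====
-- Pre_ excludes non-positive length (A always raises IndexError there) and ragged fields,
-- where A reads bounds off the current row: that usually raises IndexError and, where it
-- happens to return, the value is an accident of which rows are shorter.
def Pre_general_vertical (length : Int) (field : List (List Int)) : Prop :=
  1 ≤ length ∧ ∀ row ∈ field, row.length = (field.headD []).length

instance (length : Int) (field : List (List Int)) : Decidable (Pre_general_vertical length field) := by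
  unfold Pre_general_vertical; infer_instance

def pvWitness_general_vertical : Int × List (List Int) := (2, [[1, 0], [1, 0], [0, 0]])

def Spec_general_vertical (length : Int) (field : List (List Int)) (out : Int) : Prop := out = general_vertical_alt length field
instance (length : Int) (field : List (List Int)) (out : Int) : Decidable (Spec_general_vertical length field out) := by unfold Spec_general_vertical; infer_instance

-- ===== CLAIM (what is proved, stated in full; the proofs are below) =====
def Claim_equal_general_vertical : Prop := ∀ (length : Int) (field : List (List Int)), Dom_general_vertical length field → Pre_general_vertical length field → Spec_general_vertical length field (general_vertical length field)

-- ===== LEMMAS AND PROOFS =====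

def cellZ (field : List (List Int)) (k l : Int) : Int :=
  if 0 ≤ k ∧ k < (field.length : Int) ∧ 0 ≤ l
     ∧ l < ((PySem.List.pyGetD field k []).length : Int) then pyCell field k l else 0

lemma rect_rowLen {field : List (List Int)} {C : Nat}
    (hrect : ∀ row ∈ field, row.length = C) {k : Int} (h0 : 0 ≤ k) (hk : k < (field.length : Int)) :
    (PySem.List.pyGetD field k []).length = C := by
  have hk' : k.toNat < field.length := by omega
  rw [PySem.List.pyGetD_eq_getElem field [] h0 hk]
  exact hrect _ (List.getElem_mem hk')

lemma cellZ_char {field : List (List Int)} {C : Nat}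
    (hrect : ∀ row ∈ field, row.length = C) (k l : Int) :
    cellZ field k l = if 0 ≤ k ∧ k < (field.length : Int) ∧ 0 ≤ l ∧ l < (C : Int)
      then pyCell field k l else 0 := by
  unfold cellZ
  by_cases hk : 0 ≤ k ∧ k < (field.length : Int)
  · rw [rect_rowLen hrect hk.1 hk.2]
  · rw [if_neg (by tauto), if_neg (by tauto)]

lemma scanl_getD (j v : Int) :
    ∀ (field : List (List Int)) (a : Int) (k : Nat), k ≤ field.length →
      (List.scanl (fun acc row => acc + (if pfxCond j v row then 1 else 0)) a field).getD k 0
        = a + ((field.take k).countP (fun row => pfxCond j v row) : Int) := by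
  intro field
  induction field with
  | nil =>
    intro a k hk
    have hk0 : k = 0 := by simpa using hk
    subst hk0; simp [List.scanl]
  | cons r rs ih =>
    intro a k hk
    cases k with
    | zero => simp [List.scanl]
    | succ k =>
      rw [List.scanl_cons, List.getD_cons_succ]
      rw [List.take_succ_cons, List.countP_cons]
      rw [ih _ k (by simpa using hk)]
      by_cases h : pfxCond j v r <;> simp [h] <;> ring

lemma pfx_getD {field : List (List Int)} (j v : Int) {k : Nat} (hk : k ≤ field.length) :
    (pfx field j v).getD k 0 = ((field.take k).countP (fun row => pfxCond j v row) : Int) := by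
  rw [pfx, scanl_getD j v field 0 k hk]; ring

lemma pfx_diff_zero {field : List (List Int)} (j v : Int) {a b : Nat}
    (hab : a ≤ b) (hb : b ≤ field.length) :
    ((pfx field j v).getD b 0 - (pfx field j v).getD a 0 = 0)
      ↔ ∀ k : Nat, a ≤ k → k < b → ¬ pfxCond j v (field.getD k []) = true := by
  rw [pfx_getD j v hb, pfx_getD j v (le_trans hab hb)]
  have htake : List.take b field = List.take a field ++ List.take (b - a) (List.drop a field) := by
    rw [← List.take_add]; congr 1; omega
  rw [htake, List.countP_append]
  push_cast
  have hseglen : (List.take (b - a) (List.drop a field)).length = b - a := by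
    simp [List.length_take, List.length_drop]; omega
  have hlen : ∀ k : Nat, ∀ h : k < field.length, field.getD k [] = field[k]'h := by
    intro k hk
    exact List.getD_eq_getElem field [] hk
  have hgetseg : ∀ (idx : Nat) (h : idx < (List.take (b - a) (List.drop a field)).length),
      (List.take (b - a) (List.drop a field))[idx]'h = field[a + idx]'(by rw [hseglen] at h; omega) := by
    intro idx h
    rw [List.getElem_take, List.getElem_drop]
  constructor
  · intro h k hak hkb
    have hz : List.countP (fun row => pfxCond j v row) (List.take (b - a) (List.drop a field)) = 0 := by omega
    have h1 : k - a < (List.take (b - a) (List.drop a field)).length := by rw [hseglen]; omega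
    have hmem : field.getD k [] ∈ List.take (b - a) (List.drop a field) := by
      rw [hlen k (by omega)]
      refine List.mem_iff_getElem.mpr ⟨k - a, h1, ?_⟩
      rw [hgetseg (k - a) h1]
      congr 1
      omega
    have := (List.countP_eq_zero.mp hz) _ hmem
    simpa using this
  · intro h
    have hz : List.countP (fun row => pfxCond j v row) (List.take (b - a) (List.drop a field)) = 0 := by
      rw [List.countP_eq_zero]
      intro row hrow
      obtain ⟨idx, hidx, hrow⟩ := List.mem_iff_getElem.mp hrow
      have hq := h (a + idx) (by omega) (by omega)
      rw [hlen (a + idx) (by omega)] at hq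
      rw [← hrow, hgetseg idx hidx]
      simpa using hq
    omega

-- Q: the common per-cell condition, as a Bool

def Q (length : Int) (field : List (List Int)) (i j : Nat) : Bool :=
  ((PySem.List.pyRange (i : Int) ((i : Int) + length) 1).all fun k => !(cellZ field k (j : Int) == 0))
  && !(cellZ field ((i : Int) - 1) (j : Int) == 1)
  && !(cellZ field ((i : Int) + length) (j : Int) == 1)
  && ((PySem.List.pyRange ((i : Int) - 1) ((i : Int) + length + 1) 1).all fun k =>
        !(cellZ field k ((j : Int) - 1) == 1) && !(cellZ field k ((j : Int) + 1) == 1))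

lemma fold_and_not {α : Type} (K : List α) (h : α → Bool) (b : Bool) :
    K.foldl (fun flag k => flag && !(h k)) b = (b && !(K.any h)) := by
  have e : (fun (flag : Bool) k => flag && !(h k)) = (fun flag k => if h k = true then false else flag) := by
    funext flag k; cases h k <;> cases flag <;> simp
  rw [e, PySem.List.foldl_if_false_eq]

lemma ite_collapse (w s : Bool) (c : Int) :
    (if w = false then c else if (w && s) = true then c + 1 else c)
      = if (w && s) = true then c + 1 else c := by
  cases w <;> cases s <;> simp

lemma condA_eq (length : Int) (field : List (List Int)) {C : Nat}
    (hrect : ∀ row ∈ field, row.length = C) (hL : 1 ≤ length)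
    {i j : Nat} (hi : (i : Int) < (field.length : Int) - length + 1) (hj : j < C) :
    ((!(PySem.List.pyRange (i : Int) ((i : Int) + length) 1).any fun c => decide (pyCell field c (j : Int) = 0)) &&
     !(PySem.List.pyRange ((i : Int) - 1) ((i : Int) + length + 1) 1).any fun k =>
        (PySem.List.pyRange ((j : Int) - 1) ((j : Int) + 2) 1).any fun l =>
          decide (¬(k < 0 ∨ l < 0 ∨ k ≥ (field.length : Int) ∨ l ≥ (C : Int)
                    ∨ (l = (j : Int) ∧ (k ≥ (i : Int) ∧ k ≤ (i : Int) + length - 1)))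
                  ∧ pyCell field k l = 1))
    = Q length field i j := by
  have hcell : ∀ k l : Int, 0 ≤ k → k < (field.length : Int) → 0 ≤ l → l < (C : Int) →
      cellZ field k l = pyCell field k l := by
    intro k l h1 h2 h3 h4
    rw [cellZ_char hrect]
    exact if_pos ⟨h1, h2, h3, h4⟩
  have hcell0 : ∀ k l : Int, (k < 0 ∨ (field.length : Int) ≤ k ∨ l < 0 ∨ (C : Int) ≤ l) →
      cellZ field k l = 0 := by
    intro k l h
    rw [cellZ_char hrect]
    exact if_neg (by omega)
  rw [Q]
  apply Bool.eq_iff_iff.mpr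
  simp only [Bool.and_eq_true, Bool.not_true, Bool.not_eq_true', List.any_eq_false,
    List.any_eq_true, List.all_eq_true, PySem.List.mem_pyRange_one, decide_eq_true_eq,
    beq_eq_false_iff_ne, ne_eq, and_imp, not_exists, not_and]
  constructor
  · rintro ⟨hw, hb⟩
    have hb' : ∀ k : Int, (i : Int) - 1 ≤ k → k < (i : Int) + length + 1 →
        ∀ l : Int, (j : Int) - 1 ≤ l → l < (j : Int) + 2 →
        ¬(k < 0 ∨ l < 0 ∨ k ≥ (field.length : Int) ∨ l ≥ (C : Int)
            ∨ (l = (j : Int) ∧ (k ≥ (i : Int) ∧ k ≤ (i : Int) + length - 1))) →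
        pyCell field k l ≠ 1 := hb
    refine ⟨⟨⟨?_, ?_⟩, ?_⟩, ?_⟩
    · intro k h1 h2
      rw [hcell k (j : Int) (by omega) (by omega) (by omega) (by omega)]
      exact hw k h1 h2
    · by_cases h0 : (i : Int) - 1 < 0
      · rw [hcell0 _ _ (by omega)]; omega
      · rw [hcell _ _ (by omega) (by omega) (by omega) (by omega)]
        exact hb' ((i : Int) - 1) (by omega) (by omega) (j : Int) (by omega) (by omega) (by omega)
    · by_cases h0 : (field.length : Int) ≤ (i : Int) + length
      · rw [hcell0 _ _ (by omega)]; omega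
      · rw [hcell _ _ (by omega) (by omega) (by omega) (by omega)]
        exact hb' ((i : Int) + length) (by omega) (by omega) (j : Int) (by omega) (by omega) (by omega)
    · intro k h1 h2
      constructor
      · by_cases hin : 0 ≤ k ∧ k < (field.length : Int) ∧ 0 ≤ (j : Int) - 1
        · rw [hcell _ _ (by omega) (by omega) (by omega) (by omega)]
          exact hb' k h1 h2 ((j : Int) - 1) (by omega) (by omega) (by omega)
        · rw [hcell0 _ _ (by omega)]; omega
      · by_cases hin : 0 ≤ k ∧ k < (field.length : Int) ∧ (j : Int) + 1 < (C : Int)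
        · rw [hcell _ _ (by omega) (by omega) (by omega) (by omega)]
          exact hb' k h1 h2 ((j : Int) + 1) (by omega) (by omega) (by omega)
        · rw [hcell0 _ _ (by omega)]; omega
  · rintro ⟨⟨⟨hw, ha⟩, hz⟩, hs⟩
    constructor
    · intro k h1 h2
      have := hw k h1 h2
      rw [hcell k (j : Int) (by omega) (by omega) (by omega) (by omega)] at this
      exact this
    · intro k h1 h2 l hl1 hl2 hg hc
      push_neg at hg
      obtain ⟨hg1, hg2, hg3, hg4, hg5⟩ := hg
      rcases (by omega : l = (j : Int) - 1 ∨ l = (j : Int) ∨ l = (j : Int) + 1) with h | h | h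
      · subst h
        have := (hs k h1 h2).1
        rw [hcell _ _ (by omega) (by omega) (by omega) (by omega)] at this
        exact this hc
      · subst h
        have hk' : k = (i : Int) - 1 ∨ k = (i : Int) + length := by
          by_cases hwin : (i : Int) ≤ k ∧ k ≤ (i : Int) + length - 1
          · exact absurd (hg5 rfl) (by omega)
          · omega
        rcases hk' with h | h
        · subst h
          rw [hcell _ _ (by omega) (by omega) (by omega) (by omega)] at ha
          exact ha hc
        · subst h
          rw [hcell _ _ (by omega) (by omega) (by omega) (by omega)] at hz
          exact hz hc
      · subst h
        have := (hs k h1 h2).2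
        rw [hcell _ _ (by omega) (by omega) (by omega) (by omega)] at this
        exact this hc

lemma pfxCond_iff_cellZ {field : List (List Int)} {C : Nat}
    (hrect : ∀ row ∈ field, row.length = C) {k : Nat} (hk : k < field.length) (j' v : Int) :
    pfxCond j' v (field.getD k []) = true ↔ (0 ≤ j' ∧ j' < (C : Int) ∧ cellZ field (k : Int) j' = v) := by
  have hrow : field.getD k [] = field[k]'hk := List.getD_eq_getElem field [] hk
  have hlen : (field[k]'hk).length = C := hrect _ (List.getElem_mem hk)
  simp only [pfxCond, Bool.and_eq_true, decide_eq_true_eq, and_assoc]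
  rw [hrow, hlen]
  constructor
  · rintro ⟨h1, h2, h3⟩
    refine ⟨h1, h2, ?_⟩
    rw [cellZ_char hrect, if_pos ⟨by omega, by omega, h1, h2⟩]
    unfold pyCell
    rw [PySem.List.pyGetD_natCast, hrow]
    exact h3
  · rintro ⟨h1, h2, h3⟩
    refine ⟨h1, h2, ?_⟩
    rw [cellZ_char hrect, if_pos ⟨by omega, by omega, h1, h2⟩] at h3
    unfold pyCell at h3
    rw [PySem.List.pyGetD_natCast, hrow] at h3
    exact h3

lemma condB_iff (length : Int) (field : List (List Int)) {C : Nat}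
    (hrect : ∀ row ∈ field, row.length = C) (hL : 1 ≤ length)
    {i j : Nat} (hi : (i : Int) < (field.length : Int) - length + 1) (hj : j < C) :
    (PySem.List.pyGetD (pfx field (j : Int) 0) ((i : Int) + length) 0
        - PySem.List.pyGetD (pfx field (j : Int) 0) (i : Int) 0 = 0
     ∧ ((i : Int) = 0 ∨ pyCell field ((i : Int) - 1) (j : Int) ≠ 1)
     ∧ ((i : Int) + length = (field.length : Int) ∨ pyCell field ((i : Int) + length) (j : Int) ≠ 1)
     ∧ PySem.List.pyGetD (pfx field ((j : Int) - 1) 1) (min (field.length : Int) ((i : Int) + length + 1)) 0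
        - PySem.List.pyGetD (pfx field ((j : Int) - 1) 1) (max 0 ((i : Int) - 1)) 0 = 0
     ∧ PySem.List.pyGetD (pfx field ((j : Int) + 1) 1) (min (field.length : Int) ((i : Int) + length + 1)) 0
        - PySem.List.pyGetD (pfx field ((j : Int) + 1) 1) (max 0 ((i : Int) - 1)) 0 = 0)
    ↔ Q length field i j = true := by
  have hcell : ∀ k l : Int, 0 ≤ k → k < (field.length : Int) → 0 ≤ l → l < (C : Int) →
      cellZ field k l = pyCell field k l := by
    intro k l h1 h2 h3 h4
    rw [cellZ_char hrect]
    exact if_pos ⟨h1, h2, h3, h4⟩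
  have hcell0 : ∀ k l : Int, (k < 0 ∨ (field.length : Int) ≤ k ∨ l < 0 ∨ (C : Int) ≤ l) →
      cellZ field k l = 0 := by
    intro k l h
    rw [cellZ_char hrect]
    exact if_neg (by omega)
  -- Nat forms of the four indices
  have e1 : (i : Int) + length = ((i + length.toNat : Nat) : Int) := by push_cast; omega
  have e2 : max 0 ((i : Int) - 1) = ((i - 1 : Nat) : Int) := by push_cast; omega
  have e3 : min (field.length : Int) ((i : Int) + length + 1)
      = ((min field.length (i + length.toNat + 1) : Nat) : Int) := by push_cast; omega
  rw [e2, e3, e1, PySem.List.pyGetD_natCast, PySem.List.pyGetD_natCast,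
     PySem.List.pyGetD_natCast, PySem.List.pyGetD_natCast, PySem.List.pyGetD_natCast,
     PySem.List.pyGetD_natCast]
  rw [pfx_diff_zero (j : Int) 0 (by omega) (by omega),
     pfx_diff_zero ((j : Int) - 1) 1 (by omega) (by omega),
     pfx_diff_zero ((j : Int) + 1) 1 (by omega) (by omega)]
  rw [Q]
  simp only [Bool.and_eq_true, Bool.not_eq_true', List.all_eq_true,
    PySem.List.mem_pyRange_one, beq_eq_false_iff_ne, ne_eq, and_imp]
  have hcast : ∀ x : Int, 0 ≤ x → ((x.toNat : Nat) : Int) = x := by intro x hx; omega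
  have side : ∀ (j' : Int),
      (∀ k : Nat, i - 1 ≤ k → k < min field.length (i + length.toNat + 1) →
        ¬ pfxCond j' 1 (field.getD k []) = true)
      ↔ (∀ x : Int, (i : Int) - 1 ≤ x → x < (i : Int) + length + 1 → ¬ cellZ field x j' = 1) := by
    intro j'
    constructor
    · intro h x hx1 hx2 hc
      by_cases hin : 0 ≤ x ∧ x < (field.length : Int)
      · have hk : x.toNat < field.length := by omega
        have hnp := h x.toNat (by omega) (by omega)
        rw [pfxCond_iff_cellZ hrect hk, hcast x hin.1] at hnp
        push_neg at hnp
        by_cases hjb : 0 ≤ j' ∧ j' < (C : Int)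
        · exact (hnp hjb.1 hjb.2) hc
        · rw [hcell0 x j' (by omega)] at hc; omega
      · rw [hcell0 x j' (by omega)] at hc; omega
    · intro h k hk1 hk2 hpf
      have hk : k < field.length := by omega
      obtain ⟨hj1, hj2, hc⟩ := (pfxCond_iff_cellZ hrect hk j' 1).mp hpf
      exact h (k : Int) (by push_cast; omega) (by push_cast; omega) hc
  constructor
  · rintro ⟨h1, h2, h3, h4, h5⟩
    refine ⟨⟨⟨?_, ?_⟩, ?_⟩, ?_⟩
    · -- window
      intro x hx1 hx2 hc
      have hk : x.toNat < field.length := by omega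
      have hnp := h1 x.toNat (by omega) (by omega)
      rw [pfxCond_iff_cellZ hrect hk, hcast x (by omega)] at hnp
      exact hnp ⟨by omega, by omega, hc⟩
    · -- cell above
      by_cases h0 : (i : Int) = 0
      · rw [hcell0 _ _ (by omega)]; omega
      · rcases h2 with h2 | h2
        · exact absurd h2 h0
        · rw [hcell _ _ (by omega) (by omega) (by omega) (by omega)]; exact h2
    · -- cell below
      by_cases h0 : (i : Int) + length = (field.length : Int)
      · rw [hcell0 _ _ (by omega)]; omega
      · rcases h3 with h3 | h3
        · exact absurd h3 (by rw [← e1] at h3 ⊢; exact h0)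
        · rw [e1, hcell _ _ (by omega) (by omega) (by omega) (by omega)]; exact h3
    · -- side columns
      intro x hx1 hx2
      exact ⟨(side ((j : Int) - 1)).mp h4 x hx1 hx2, (side ((j : Int) + 1)).mp h5 x hx1 hx2⟩
  · rintro ⟨⟨⟨hw, ha⟩, hz⟩, hs⟩
    refine ⟨?_, ?_, ?_, ?_, ?_⟩
    · -- window
      intro k hk1 hk2 hpf
      have hk : k < field.length := by omega
      obtain ⟨hj1, hj2, hc⟩ := (pfxCond_iff_cellZ hrect hk (j : Int) 0).mp hpf
      exact hw (k : Int) (by push_cast; omega) (by push_cast; omega) hc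
    · -- cell above
      by_cases h0 : (i : Int) = 0
      · exact Or.inl h0
      · refine Or.inr ?_
        rw [← hcell _ _ (by omega) (by omega) (by omega) (by omega)]
        exact ha
    · -- cell below
      by_cases h0 : (i : Int) + length = (field.length : Int)
      · exact Or.inl (by rw [← e1]; exact_mod_cast h0)
      · refine Or.inr ?_
        rw [← hcell _ _ (by omega) (by omega) (by omega) (by omega)]
        rw [← e1]
        exact hz
    · exact (side ((j : Int) - 1)).mpr (fun x hx1 hx2 => (hs x hx1 hx2).1)
    · exact (side ((j : Int) + 1)).mpr (fun x hx1 hx2 => (hs x hx1 hx2).2)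

lemma A_count (length : Int) (field : List (List Int))
    (hL : 1 ≤ length) (hrect : ∀ row ∈ field, row.length = (field.headD []).length) :
    general_vertical length field =
      ((List.range ((field.length : Int) - length + 1).toNat).map (fun i =>
        ((List.range (field.headD []).length).countP (fun j => Q length field i j) : Int))).sum := by
  unfold general_vertical
  rw [PySem.List.pyRange_one 0 ((field.length : Int) - length + 1)]
  simp only [zero_add, sub_zero]
  rw [List.foldl_map]
  rw [PySem.List.foldl_congr_mem _ _
    (fun (count : Int) (i : Nat) => count + ((List.range (field.headD []).length).countP (fun j => Q length field i j) : Int)) 0 ?_]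
  · rw [PySem.List.foldl_add]
    simp
  intro acc i hi
  rw [List.mem_range] at hi
  have hiI : (i : Int) < (field.length : Int) - length + 1 := by omega
  have hrl := rect_rowLen hrect (show (0:Int) ≤ (i : Int) by omega)
    (show (i : Int) < (field.length : Int) by omega)
  have hrowLen : ((PySem.List.pyGetD field (i : Int) []).length : Int) = ((field.headD []).length : Int) := by
    exact_mod_cast hrl
  show (PySem.List.pyRange 0 ((PySem.List.pyGetD field (i : Int) []).length : Int) 1).foldl _ acc = _
  rw [hrowLen]
  rw [PySem.List.pyRange_one 0 ((field.headD []).length : Int)]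
  simp only [zero_add, sub_zero, Int.toNat_natCast]
  rw [List.foldl_map]
  rw [PySem.List.foldl_congr_mem _ _
    (fun (count : Int) (j : Nat) => if Q length field i j = true then count + 1 else count) acc ?_]
  · rw [PySem.List.foldl_if_add_one]
  intro acc2 j hj
  rw [List.mem_range] at hj
  -- rewrite the two flag folds
  have ew : (fun (flag : Bool) (check : Int) => if pyCell field check (j : Int) = 0 then false else flag)
      = (fun flag check => if (fun c => decide (pyCell field c (j : Int) = 0)) check = true then false else flag) := by
    funext flag c; simp
  have eb : ∀ k : Int, (fun (flag : Bool) (l : Int) =>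
        if k < 0 ∨ l < 0 ∨ k ≥ (field.length : Int) ∨ l ≥ ((field.headD []).length : Int)
           ∨ (l = (j : Int) ∧ (k ≥ (i : Int) ∧ k ≤ (i : Int) + length - 1)) then flag
        else if pyCell field k l = 1 then false else flag)
      = (fun flag l => if (fun l' => decide (¬(k < 0 ∨ l' < 0 ∨ k ≥ (field.length : Int) ∨ l' ≥ ((field.headD []).length : Int)
           ∨ (l' = (j : Int) ∧ (k ≥ (i : Int) ∧ k ≤ (i : Int) + length - 1))) ∧ pyCell field k l' = 1)) l = true
          then false else flag) := by
    intro k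
    funext flag l
    by_cases h1 : k < 0 ∨ l < 0 ∨ k ≥ (field.length : Int) ∨ l ≥ ((field.headD []).length : Int)
           ∨ (l = (j : Int) ∧ (k ≥ (i : Int) ∧ k ≤ (i : Int) + length - 1))
    · rw [if_pos h1, if_neg (by simp only [decide_eq_true_eq]; rintro ⟨hnh, _⟩; exact hnh h1)]
    · rw [if_neg h1]
      by_cases h2 : pyCell field k l = 1
      · rw [if_pos h2, if_pos (by simp only [decide_eq_true_eq]; exact ⟨h1, h2⟩)]
      · rw [if_neg h2, if_neg (by simp only [decide_eq_true_eq]; rintro ⟨_, hp⟩; exact h2 hp)]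
  simp only [ew, PySem.List.foldl_if_false_eq, Bool.true_and]
  simp only [eb, PySem.List.foldl_if_false_eq]
  rw [fold_and_not]
  rw [ite_collapse]
  rw [condA_eq length field hrect hL hiI hj]

lemma B_count (length : Int) (field : List (List Int))
    (hL : 1 ≤ length) (hrect : ∀ row ∈ field, row.length = (field.headD []).length) :
    general_vertical_alt length field =
      ((List.range (field.headD []).length).map (fun j =>
        ((List.range ((field.length : Int) - length + 1).toNat).countP (fun i => Q length field i j) : Int))).sum := by
  unfold general_vertical_alt
  dsimp only
  rw [PySem.List.pyRange_one 0 ((field.headD []).length : Int)]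
  simp only [zero_add, sub_zero, Int.toNat_natCast]
  rw [List.foldl_map]
  rw [PySem.List.foldl_congr_mem _ _
    (fun (count : Int) (j : Nat) => count + ((List.range ((field.length : Int) - length + 1).toNat).countP (fun i => Q length field i j) : Int)) 0 ?_]
  · rw [PySem.List.foldl_add]
    simp
  intro acc j hj
  rw [List.mem_range] at hj
  show (PySem.List.pyRange 0 ((field.length : Int) - length + 1) 1).foldl _ acc = _
  rw [PySem.List.pyRange_one 0 ((field.length : Int) - length + 1)]
  simp only [zero_add, sub_zero]
  rw [List.foldl_map]
  rw [PySem.List.foldl_congr_mem _ _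
    (fun (count : Int) (i : Nat) => if Q length field i j = true then count + 1 else count) acc ?_]
  · rw [PySem.List.foldl_if_add_one]
  intro acc2 i hi
  rw [List.mem_range] at hi
  have hiI : (i : Int) < (field.length : Int) - length + 1 := by omega
  show (if _ then acc2 + 1 else acc2) = _
  rw [if_congr (condB_iff length field hrect hL hiI hj) rfl rfl]

lemma sum_count_swap (m n : Nat) (P : Nat → Nat → Bool) :
    ((List.range m).map (fun i => ((List.range n).countP (P i) : Int))).sum
      = ((List.range n).map (fun j => ((List.range m).countP (fun i => P i j) : Int))).sum := by
  have bridge : ∀ (f : Nat → Int) (k : Nat), ((List.range k).map f).sum = ∑ i ∈ Finset.range k, f i := by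
    intro f k; exact Int.neg_inj.mp rfl
  have cp : ∀ (p : Nat → Bool) (k : Nat), ((List.range k).countP p : Int) = ∑ j ∈ Finset.range k, if p j then (1 : Int) else 0 := by
    intro p k
    induction k with
    | zero => simp
    | succ k ih => rw [List.range_succ, Finset.sum_range_succ, List.countP_append, ← ih]; simp [List.countP_cons]
  rw [bridge, bridge]
  simp only [cp]
  exact Finset.sum_comm

-- ===== VERDICT (by name: the statement is the Claim_ definition above) =====
theorem general_vertical_spec : Claim_equal_general_vertical := by
  intro length field _hdom hpre
  obtain ⟨hL, hrect⟩ := hpre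
  unfold Spec_general_vertical
  rw [A_count length field hL hrect, B_count length field hL hrect, sum_count_swap]
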